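-- pv_equiv track=rewrite | github.com/BjornFJohansson/seguid_calculator | Implementations/seguids.py | smallest_rotation_py
-- ===== SOURCE A (Python) =====
-- def smallest_rotation_py(s):
--     """Smallest rotation of a string.
--
--     Algorithm described in Pierre Duval, Jean. 1983. Factorizing Words
--     over an Ordered Alphabet. Journal of Algorithms & Computational Technology
--     4 (4) (December 1): 363–381. and Algorithms on strings and sequences based
--     on Lyndon words, David Eppstein 2011.
--     https://gist.github.com/dvberkel/1950267
--
--     This is a pure python implementation, considerably slower than
--
--     Examples
--     --------
--     >>> smallest_rotation("taaa")
--     'aaat'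
--
--     """
--     from array import array as _array
--     prev, rep = None, 0
--     ds = _array("u", 2 * s)
--     lens, lends = len(s), len(ds)
--     old = 0
--     k = 0
--     w = ""
--     while k < lends:
--         i, j = k, k + 1
--         while j < lends and ds[i] <= ds[j]:
--             i = (ds[i] == ds[j]) and i + 1 or k
--             j += 1
--         while k < i + 1:
--             k += j - i
--             prev = w
--             w = ds[old:k]
--             old = k
--             if w == prev:
--                 rep += 1
--             else:
--                 prev, rep = w, 1
--             if len(w) * rep == lens:
--                 return "".join(w * rep)
-- ===== SOURCE B (Python) =====
-- def smallest_rotation_py(s):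
--     """Smallest rotation of a string.
--
--     Computed directly from the definition behind Duval's algorithm: repeatedly
--     strip from the doubled string its longest prefix that is a Lyndon word
--     (a word strictly smaller than every one of its proper suffixes), counting
--     runs of equal factors; the first run whose total length is len(s) is the
--     smallest rotation.
--     """
--     n = len(s)
--     t = s + s
--     N = len(t)
--     prev, rep, pos = None, 0, 0
--     while pos < N:
--         rem = t[pos:]
--         p = 1
--         for L in range(1, len(rem) + 1):
--             u = rem[:L]
--             if all(u < u[i:] for i in range(1, L)):
--                 p = L
--         w = rem[:p]
--         if w == prev:
--             rep += 1
--         else: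
--             prev, rep = w, 1
--         if p * rep == n:
--             return w * rep
--         pos += p
--     return None
-- ===== Notes on version B (the rewrite author's own statement) =====
-- stated objective: simpler
-- what changed: A runs Duval's optimized two-pointer scan over the doubled string; B instead computes each Chen-Fox-Lyndon factor directly from the definition (the longest prefix that is strictly smaller than every one of its proper suffixes, found by explicitly testing every prefix against all its suffixes), keeping the same run-length early return, so the clever index juggling disappears at the cost of speed.
-- outside the precondition, e.g. on smallest_rotation_py(''): A returns None, B returns None
import Mathlib
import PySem

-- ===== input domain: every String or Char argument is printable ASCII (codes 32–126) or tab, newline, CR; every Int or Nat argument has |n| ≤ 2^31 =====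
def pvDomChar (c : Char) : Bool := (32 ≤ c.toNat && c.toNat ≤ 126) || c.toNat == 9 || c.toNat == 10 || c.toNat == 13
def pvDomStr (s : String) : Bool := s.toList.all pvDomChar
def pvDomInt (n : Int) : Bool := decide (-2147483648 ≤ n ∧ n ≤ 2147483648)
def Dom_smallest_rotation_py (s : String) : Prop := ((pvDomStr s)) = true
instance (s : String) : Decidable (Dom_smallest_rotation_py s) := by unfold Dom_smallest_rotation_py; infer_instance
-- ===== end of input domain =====

-- B replaces Duval's optimized linear scan by the definitional greedy Lyndon factorization
-- (longest prefix smaller than all its proper suffixes), same run-length early return; objective: simpler, not faster.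

-- ===== PORT A =====
-- inner 'while j < lends and ds[i] <= ds[j]' loop; ds[i] read as getD (indices stay in range in every run)
def pvInnerA (t : List Char) (N k : Nat) (i j : Nat) : Nat × Nat :=
  if h : j < N ∧ t.getD i ' ' ≤ t.getD j ' ' then
    pvInnerA t N k (if t.getD i ' ' = t.getD j ' ' then i + 1 else k) (j + 1)
  else (i, j)
termination_by N - j
decreasing_by omega

-- the 'while k < i + 1' emission loop; returns .inr on Python's 'return "".join(w * rep)';
-- fuel only guards against the (unreachable, since i < j) non-advancing case
def pvEmitA (t : List Char) (n i j : Nat) :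
    Nat → Nat → Nat → List Char → Nat → List Char → ((Nat × Nat × List Char × Nat × List Char) ⊕ List Char)
  | 0, k, old, prev, rep, w => Sum.inl (k, old, prev, rep, w)
  | fuel + 1, k, old, prev, rep, w =>
    if k < i + 1 then
      let k' := k + (j - i)
      let prev' := w
      let w' := (t.drop old).take (k' - old)      -- ds[old:k'] (0 ≤ old ≤ k', Python slice)
      let rep' := if w' = prev' then rep + 1 else 1
      let prev'' := if w' = prev' then prev' else w'
      if w'.length * rep' = n then Sum.inr (List.flatten (List.replicate rep' w'))
      else pvEmitA t n i j fuel k' k' prev'' rep' w'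
    else Sum.inl (k, old, prev, rep, w)

-- the outer 'while k < lends' loop; falling out of the loop is Python's implicit 'return None' ([] here, outside Pre_)
def pvOuterA (t : List Char) (lens lends : Nat) :
    Nat → Nat → Nat → List Char → Nat → List Char → List Char
  | 0, _, _, _, _, _ => []
  | fuel + 1, k, old, prev, rep, w =>
    if k < lends then
      let ij := pvInnerA t lends k k (k + 1)
      match pvEmitA t lens ij.1 ij.2 (lends + 1) k old prev rep w with
      | .inr r => r
      | .inl st => pvOuterA t lens lends fuel st.1 st.2.1 st.2.2.1 st.2.2.2.1 st.2.2.2.2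
    else []

def smallest_rotation_py (s : String) : String :=
  let cs := s.toList
  let ds := cs ++ cs                               -- array("u", 2 * s)
  let lens := cs.length
  let lends := ds.length
  String.mk (pvOuterA ds lens lends (lends + 1) 0 0 [] 0 [])

-- ===== PORT B =====
-- all(u < u[i:] for i in range(1, len(u))); Python str '<' is code-point lex = '<' on List Char
def pvIsLyn (u : List Char) : Bool :=
  (List.range' 1 (u.length - 1)).all fun i => decide (u < u.drop i)

-- p = 1; for L in range(1, len(rem) + 1): if <Lyndon>: p = L
def pvPLen (r : List Char) : Nat :=
  (List.range' 1 r.length).foldl (fun p L => if pvIsLyn (r.take L) then L else p) 1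

-- the 'while pos < N' loop; fallthrough is Python's 'return None' ([] here, outside Pre_)
def pvLoopB (t : List Char) (n N : Nat) : Nat → Nat → Option (List Char) → Nat → List Char
  | 0, _, _, _ => []
  | fuel + 1, pos, prev, rep =>
    if pos < N then
      let rem := t.drop pos
      let p := pvPLen rem
      let w := rem.take p
      let rep' := if some w = prev then rep + 1 else 1
      if p * rep' = n then List.flatten (List.replicate rep' w)
      else pvLoopB t n N fuel (pos + p) (some w) rep'
    else []

def smallest_rotation_py_alt (s : String) : String :=
  let cs := s.toList
  let n := cs.length
  let t := cs ++ cs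
  let N := t.length
  String.mk (pvLoopB t n N (N + 1) 0 none 0)

-- ===== PRECONDITION & SPEC =====
-- Pre_ excludes only the empty string, on which A returns None instead of a str.
def Pre_smallest_rotation_py (s : String) : Prop := s ≠ ""
instance (s : String) : Decidable (Pre_smallest_rotation_py s) := by
  unfold Pre_smallest_rotation_py; infer_instance

def pvWitness_smallest_rotation_py : String := "taaa"

def Spec_smallest_rotation_py (s : String) (out : String) : Prop := out = smallest_rotation_py_alt s
instance (s : String) (out : String) : Decidable (Spec_smallest_rotation_py s out) := by
  unfold Spec_smallest_rotation_py; infer_instance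

-- ===== CLAIM (what is proved, stated in full; the proofs are below) =====
def Claim_equal_smallest_rotation_py : Prop :=
  ∀ (s : String), Dom_smallest_rotation_py s → Pre_smallest_rotation_py s →
    Spec_smallest_rotation_py s (smallest_rotation_py s)

-- ===== LEMMAS AND PROOFS =====

-- reading a character (Python ds[i]); total, with ' ' off the end
def pvGd (x : List Char) (i : Nat) : Char := x.getD i ' '

lemma pv_gd_eq_getElem (x : List Char) (r : Nat) (h : r < x.length) : pvGd x r = x[r] := by
  simp [pvGd, List.getD_eq_getElem?_getD, List.getElem?_eq_getElem h]

lemma pv_gd_drop (x : List Char) (k r : Nat) : pvGd (x.drop k) r = pvGd x (k + r) := by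
  simp [pvGd, List.getD_eq_getElem?_getD, List.getElem?_drop]

lemma pv_gd_take (x : List Char) (m r : Nat) (h : r < m) : pvGd (x.take m) r = pvGd x r := by
  simp [pvGd, List.getD_eq_getElem?_getD, List.getElem?_take, h]

lemma pv_take_eq_of_gd (x y : List Char) (m : Nat) (hx : m ≤ x.length) (hy : m ≤ y.length)
    (h : ∀ r, r < m → pvGd x r = pvGd y r) : x.take m = y.take m := by
  apply List.ext_getElem
  · simp [hx, hy]
  · intro i h1 h2
    simp only [List.length_take] at h1
    have hi : i < m := lt_of_lt_of_le h1 (min_le_left _ _)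
    have := h i hi
    rw [pv_gd_eq_getElem _ _ (lt_of_lt_of_le hi hx), pv_gd_eq_getElem _ _ (lt_of_lt_of_le hi hy)] at this
    simpa [List.getElem_take] using this

lemma pv_ext_gd (x y : List Char) (hl : x.length = y.length)
    (h : ∀ r, r < x.length → pvGd x r = pvGd y r) : x = y := by
  have h2 := pv_take_eq_of_gd x y x.length le_rfl (by omega) h
  rwa [List.take_length, hl, List.take_length] at h2

-- 'strictly smaller at position m'
def pvLtAt (x y : List Char) (m : Nat) : Prop :=
  m < x.length ∧ m < y.length ∧ x.take m = y.take m ∧ pvGd x m < pvGd y m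

lemma pv_lt_iff (x y : List Char) :
    x < y ↔ (∃ m, pvLtAt x y m) ∨ (x <+: y ∧ x ≠ y) := by
  induction x generalizing y with
  | nil =>
    cases y with
    | nil => simp [pvLtAt, lt_irrefl]
    | cons b ys => simp [pvLtAt, List.nil_lt_cons]
  | cons a xs ih =>
    cases y with
    | nil =>
      simp only [List.not_lt_nil, false_iff]
      push_neg
      constructor
      · intro m hm
        simp [pvLtAt] at hm
      · intro h; exact absurd (List.prefix_nil.mp h) (by simp)
    | cons b ys =>
      rw [List.cons_lt_cons_iff, ih ys]
      constructor
      · rintro (hab | ⟨rfl, h⟩)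
        · exact Or.inl ⟨0, by simp [pvLtAt, pvGd, hab]⟩
        · rcases h with ⟨m, h1, h2, h3, h4⟩ | ⟨h1, h2⟩
          · exact Or.inl ⟨m + 1, by simp [pvLtAt, pvGd] at h4 ⊢; exact ⟨h1, h2, h3, h4⟩⟩
          · exact Or.inr ⟨by simpa using h1, by simpa using h2⟩
      · rintro (⟨m, h1, h2, h3, h4⟩ | ⟨h1, h2⟩)
        · cases m with
          | zero => exact Or.inl (by simpa [pvGd] using h4)
          | succ m =>
            simp only [List.take_succ_cons, List.cons.injEq] at h3
            refine Or.inr ⟨h3.1, Or.inl ⟨m, ?_⟩⟩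
            simp only [List.length_cons, Nat.add_lt_add_iff_right] at h1 h2
            exact ⟨h1, h2, h3.2, by simpa [pvGd] using h4⟩
        · rcases List.cons_prefix_cons.mp h1 with ⟨rfl, h3⟩
          by_cases hxy : xs = ys
          · exact absurd (by rw [hxy]) h2
          · exact Or.inr ⟨rfl, Or.inr ⟨h3, hxy⟩⟩

lemma pv_lt_of_ltAt (x y : List Char) (m : Nat) (h : pvLtAt x y m) : x < y :=
  (pv_lt_iff x y).mpr (Or.inl ⟨m, h⟩)

lemma pv_gd_of_prefix (x y : List Char) (h : y <+: x) (m : Nat) (hm : m < y.length) :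
    pvGd x m = pvGd y m := by
  rcases h with ⟨r, rfl⟩
  simp [pvGd, List.getD_eq_getElem?_getD, List.getElem?_append_left hm]

lemma pv_not_lt_of_prefix (x y : List Char) (h : y <+: x) : ¬ x < y := by
  intro hlt
  rcases (pv_lt_iff x y).mp hlt with ⟨m, h1, h2, h3, h4⟩ | ⟨h1, h2⟩
  · rw [pv_gd_of_prefix x y h m h2] at h4
    exact lt_irrefl _ h4
  · exact h2 (List.IsPrefix.eq_of_length_le h1 h.length_le)

-- a Lyndon word: strictly smaller than each of its proper suffixes
def pvLyn (u : List Char) : Prop := ∀ i, 0 < i → i < u.length → u < u.drop i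

lemma pv_gd_append_left (w z : List Char) (r : Nat) (h : r < w.length) :
    pvGd (w ++ z) r = pvGd w r := by
  simp [pvGd, List.getD_eq_getElem?_getD, List.getElem?_append_left h]

lemma pv_gd_append_concat (w : List Char) (c : Char) : pvGd (w ++ [c]) w.length = c := by
  simp [pvGd, List.getD_eq_getElem?_getD]

-- Lyndon suffix comparison gives a strict in-range difference
lemma pv_lyn_strict (u : List Char) (r0 : Nat) (h0 : 0 < r0) (hr : r0 < u.length)
    (hLyn : pvLyn u) :
    ∃ ℓ0, ℓ0 + r0 < u.length ∧ (∀ r, r < ℓ0 → pvGd u r = pvGd u (r0 + r)) ∧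
      pvGd u ℓ0 < pvGd u (r0 + ℓ0) := by
  have hlt := hLyn r0 h0 hr
  rcases (pv_lt_iff _ _).mp hlt with ⟨ℓ0, h1, h2, h3, h4⟩ | ⟨h1, _⟩
  · refine ⟨ℓ0, ?_, ?_, ?_⟩
    · have := List.length_drop (l := u) (i := r0) ▸ h2
      omega
    · intro r hr'
      have := congrArg (fun l => pvGd l r) h3
      simp only at this
      rw [pv_gd_take _ _ _ hr', pv_gd_take _ _ _ hr', pv_gd_drop] at this
      exact this
    · rwa [pv_gd_drop] at h4
  · have := h1.length_le
    simp [List.length_drop] at this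
    omega

-- THE maintenance lemma: a prefix of u^∞ (u Lyndon) extended with a character
-- strictly above the continuation is itself Lyndon
lemma pv_lyn_extend (u w : List Char) (c : Char) (p m : Nat)
    (hp : u.length = p) (hp0 : 0 < p) (hpm : p ≤ m) (hw : w.length = m)
    (hLyn : pvLyn u)
    (hPW : ∀ r, r < m → pvGd w r = pvGd u (r % p))
    (hc : pvGd u (m % p) < c) :
    pvLyn (w ++ [c]) := by
  intro x hx0 hxlen
  simp only [List.length_append, List.length_cons, List.length_nil, hw] at hxlen
  have hxm : x ≤ m := by omega
  have hdrop : (w ++ [c]).drop x = w.drop x ++ [c] := by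
    rw [List.drop_append_of_le_length (by omega)]
  rw [hdrop]
  -- character reads on both sides
  have hX : ∀ r, r < m → pvGd (w ++ [c]) r = pvGd u (r % p) := by
    intro r hr
    rw [pv_gd_append_left _ _ _ (by omega), hPW r hr]
  have hXm : pvGd (w ++ [c]) m = c := by
    have := pv_gd_append_concat w c
    rwa [hw] at this
  have hZ : ∀ r, r < m - x → pvGd (w.drop x ++ [c]) r = pvGd u ((x + r) % p) := by
    intro r hr
    rw [pv_gd_append_left _ _ _ (by simp [List.length_drop]; omega), pv_gd_drop, hPW _ (by omega)]
  have hZm : pvGd (w.drop x ++ [c]) (m - x) = c := by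
    have := pv_gd_append_concat (w.drop x) c
    rwa [List.length_drop, hw] at this
  have hlenX : (w ++ [c]).length = m + 1 := by simp [hw]
  have hlenZ : (w.drop x ++ [c]).length = m - x + 1 := by simp [hw]
  by_cases hr0 : x % p = 0
  · -- suffix starts at a multiple of the period
    apply pv_lt_of_ltAt _ _ (m - x)
    refine ⟨by omega, by omega, ?_, ?_⟩
    · apply pv_take_eq_of_gd _ _ _ (by omega) (by omega)
      intro r hr
      rw [hX r (by omega), hZ r (by omega)]
      congr 1
      simp [Nat.add_mod, hr0]
    · rw [hZm, hX (m - x) ?side]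
      · have : (m - x) % p = m % p := by
          conv_rhs => rw [show m = (m - x) + x by omega]
          simp [Nat.add_mod, hr0]
        rw [this]; exact hc
      case side => omega
  · -- suffix starts inside a period: use the Lyndon strict difference of u
    set r0 := x % p with hr0def
    have hr0p : r0 < p := Nat.mod_lt _ hp0
    obtain ⟨ℓ0, hℓ1, hℓeq, hℓlt⟩ := pv_lyn_strict u r0 (by omega) (by omega) hLyn
    have hcong : ∀ r, r < m - x → (x + r) % p = (r0 + r) % p := by
      intro r _
      rw [hr0def, Nat.add_mod x r p, Nat.add_mod (x % p) r p, Nat.mod_mod]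
    have hmod : (r0 + (m - x)) % p = m % p := by
      conv_rhs => rw [show m = x + (m - x) by omega]
      rw [hr0def, Nat.add_mod x (m - x) p, Nat.add_mod (x % p) (m - x) p, Nat.mod_mod]
    -- pointwise equality of the two sides before min ℓ0 (m - x)
    have hagree : ∀ r, r < ℓ0 → r < m - x →
        pvGd (w ++ [c]) r = pvGd (w.drop x ++ [c]) r := by
      intro r h1 h2
      rw [hX r (by omega), hZ r h2, hcong r h2]
      have h3 : r % p = r := Nat.mod_eq_of_lt (by omega)
      have h4 : (r0 + r) % p = r0 + r := Nat.mod_eq_of_lt (by omega)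
      rw [h3, h4]
      exact hℓeq r h1
    by_cases hcase : ℓ0 < m - x
    · apply pv_lt_of_ltAt _ _ ℓ0
      refine ⟨by omega, by omega, ?_, ?_⟩
      · apply pv_take_eq_of_gd _ _ _ (by omega) (by omega)
        intro r hr
        exact hagree r hr (by omega)
      · rw [hX ℓ0 (by omega), hZ ℓ0 hcase, hcong ℓ0 hcase]
        have h3 : ℓ0 % p = ℓ0 := Nat.mod_eq_of_lt (by omega)
        have h4 : (r0 + ℓ0) % p = r0 + ℓ0 := Nat.mod_eq_of_lt (by omega)
        rw [h3, h4]
        exact hℓlt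
    · -- the suffix hits c first
      apply pv_lt_of_ltAt _ _ (m - x)
      refine ⟨by omega, by omega, ?_, ?_⟩
      · apply pv_take_eq_of_gd _ _ _ (by omega) (by omega)
        intro r hr
        exact hagree r (by omega) hr
      · rw [hZm, hX (m - x) (by omega)]
        have h3 : (m - x) % p = m - x := Nat.mod_eq_of_lt (by omega)
        rw [h3]
        rcases Nat.lt_or_ge (m - x) ℓ0 with hlt | hge
        · have := hℓeq (m - x) hlt
          rw [show r0 + (m - x) = (r0 + (m-x)) % p from (Nat.mod_eq_of_lt (by omega)).symm, hmod] at this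
          rw [this]; exact hc
        · have heq : m - x = ℓ0 := by omega
          rw [heq]
          calc pvGd u ℓ0 < pvGd u (r0 + ℓ0) := hℓlt
            _ = pvGd u (m % p) := by
                rw [show r0 + ℓ0 = (r0 + ℓ0) % p from (Nat.mod_eq_of_lt (by omega)).symm, ← heq, hmod]
            _ < c := hc

lemma pv_isLyn_iff (u : List Char) : pvIsLyn u = true ↔ pvLyn u := by
  simp only [pvIsLyn, List.all_eq_true, List.mem_range'_1, decide_eq_true_eq, pvLyn]
  constructor
  · intro h i h1 h2
    exact h i ⟨h1, by omega⟩
  · intro h i ⟨h1, h2⟩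
    exact h i h1 (by omega)

lemma pv_foldl_keep (r : List Char) (l : List Nat) (acc : Nat)
    (h : ∀ L ∈ l, pvIsLyn (r.take L) = false) :
    l.foldl (fun p L => if pvIsLyn (r.take L) then L else p) acc = acc := by
  induction l generalizing acc with
  | nil => rfl
  | cons a l ih =>
    have ha := h a List.mem_cons_self
    rw [List.foldl_cons, if_neg (by simp [ha])]
    exact ih acc fun L hL => h L (List.mem_cons_of_mem a hL)

lemma pv_plen_spec (r : List Char) (p : Nat) (h1 : 1 ≤ p) (h2 : p ≤ r.length)
    (hLyn : pvIsLyn (r.take p) = true)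
    (hmax : ∀ L, p < L → L ≤ r.length → pvIsLyn (r.take L) = false) :
    pvPLen r = p := by
  unfold pvPLen
  have hsplit : List.range' 1 p ++ List.range' (1 + 1 * p) (r.length - p) =
      List.range' 1 (p + (r.length - p)) := List.range'_append
  rw [show r.length = p + (r.length - p) by omega, ← hsplit, List.foldl_append]
  rw [pv_foldl_keep r _ _ (by
    intro L hL
    simp only [List.mem_range'_1] at hL
    exact hmax L (by omega) (by omega))]
  have hcat : List.range' 1 p = List.range' 1 (p - 1) ++ [p] := by
    have := List.range'_concat (s := 1) (n := p - 1) (step := 1)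
    rw [show 1 + 1 * (p-1) = p by omega] at this
    rw [← this]
    congr 1
    omega
  rw [hcat, List.foldl_append]
  simp [hLyn]

-- the inner-loop exit data pins the longest Lyndon prefix of the remainder to p
lemma pv_plen_eq (t : List Char) (pos p M : Nat)
    (hp0 : 0 < p) (hpM : p ≤ M) (hMN : pos + M ≤ t.length)
    (hLyn : pvLyn ((t.drop pos).take p))
    (hPW : ∀ r, r < M → pvGd t (pos + r) = pvGd ((t.drop pos).take p) (r % p))
    (hEND : pos + M = t.length ∨
      (pos + M < t.length ∧ pvGd t (pos + M) < pvGd ((t.drop pos).take p) (M % p))) :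
    pvPLen (t.drop pos) = p := by
  set rem := t.drop pos with hrem
  set u := rem.take p with hu
  have hremlen : rem.length = t.length - pos := by simp [hrem]
  have hgd_rem : ∀ r, pvGd rem r = pvGd t (pos + r) := fun r => pv_gd_drop t pos r
  apply pv_plen_spec rem p hp0 (by omega) ((pv_isLyn_iff _).mpr hLyn)
  intro L hL1 hL2
  rw [← Bool.not_eq_true]
  rw [pv_isLyn_iff]
  intro hLynX
  set x := rem.take L with hx
  have hxlen : x.length = L := by simp [hx]; omega
  have hgd_x : ∀ r, r < L → pvGd x r = pvGd t (pos + r) := by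
    intro r hr
    rw [hx, pv_gd_take _ _ _ hr, hgd_rem]
  rcases Nat.lt_or_ge M L with hML | hLM
  · -- L > M : the word covers the strictly-smaller continuation character
    have hMN' : pos + M < t.length := by omega
    rcases hEND with h | ⟨_, hc⟩
    · omega
    set δ := p * (M / p) with hδ
    have hδM : δ + M % p = M := by rw [hδ]; exact Nat.div_add_mod M p
    have hδmod : ∀ r, (δ + r) % p = r % p := by
      intro r
      rw [Nat.add_mod, hδ, Nat.mul_mod_right]
      simp [Nat.mod_mod]
    have hδ1 : p ≤ δ := by
      rw [hδ]
      have : 1 ≤ M / p := (Nat.one_le_div_iff hp0).mpr hpM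
      calc p = p * 1 := by omega
        _ ≤ p * (M / p) := Nat.mul_le_mul_left p this
    have hxz := hLynX δ (by omega) (by omega)
    -- but the suffix at δ is smaller: strict difference at offset M % p
    have hz : pvLtAt (x.drop δ) x (M % p) := by
      refine ⟨?_, ?_, ?_, ?_⟩
      · simp [List.length_drop, hxlen]; omega
      · omega
      · apply pv_take_eq_of_gd _ _ _ (by simp [List.length_drop, hxlen]; omega) (by omega)
        intro r hr
        rw [pv_gd_drop, hgd_x (δ + r) (by omega), hgd_x r (by omega),
          hPW (δ + r) (by omega), hPW r (by omega), hδmod]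
      · rw [pv_gd_drop, show δ + M % p = M from hδM, hgd_x M (by omega),
          hgd_x (M % p) (by omega), hPW (M % p) (by omega), Nat.mod_mod]
        exact hc
    exact absurd hxz (lt_asymm (pv_lt_of_ltAt _ _ _ hz))
  · -- p < L ≤ M : the word is périodic, its suffix at p is one of its prefixes
    have hperiodic : x.drop p = x.take (L - p) := by
      apply pv_ext_gd
      · simp [List.length_drop, hxlen]
      · intro r hr
        simp only [List.length_drop, hxlen] at hr
        rw [pv_gd_drop, pv_gd_take _ _ _ hr, hgd_x (p + r) (by omega), hgd_x r (by omega),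
          hPW (p + r) (by omega), hPW r (by omega)]
        congr 1
        simp [Nat.add_mod]
    have hpre : x.drop p <+: x := hperiodic ▸ List.take_prefix _ _
    exact pv_not_lt_of_prefix _ _ hpre (hLynX p hp0 (by omega))

lemma pv_inner_spec (t : List Char) (k : Nat) :
    ∀ d i j, t.length - j ≤ d → k ≤ i → i < j → j ≤ t.length →
    pvLyn ((t.drop k).take (j - i)) →
    (∀ r, r < j - k → pvGd t (k + r) = pvGd ((t.drop k).take (j - i)) (r % (j - i))) →
    ∃ i' j', pvInnerA t t.length k i j = (i', j') ∧
      k ≤ i' ∧ i' < j' ∧ j' ≤ t.length ∧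
      pvLyn ((t.drop k).take (j' - i')) ∧
      (∀ r, r < j' - k → pvGd t (k + r) = pvGd ((t.drop k).take (j' - i')) (r % (j' - i'))) ∧
      (j' = t.length ∨ (j' < t.length ∧ pvGd t j' < pvGd t i')) := by
  intro d
  induction d with
  | zero =>
    intro i j hd h1 h2 h3 hLyn hPW
    have hj : j = t.length := by omega
    refine ⟨i, j, ?_, h1, h2, h3, hLyn, hPW, Or.inl hj⟩
    rw [pvInnerA, dif_neg (by omega)]
  | succ d ih =>
    intro i j hd h1 h2 h3 hLyn hPW
    by_cases hc : j < t.length ∧ t.getD i ' ' ≤ t.getD j ' '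
    · rw [pvInnerA, dif_pos hc]
      by_cases he : t.getD i ' ' = t.getD j ' '
      · rw [if_pos he]
        have he' : pvGd t i = pvGd t j := he
        have hp : j + 1 - (i + 1) = j - i := by omega
        apply ih (i + 1) (j + 1) (by omega) (by omega) (by omega) (by omega)
          (by rw [hp]; exact hLyn)
        rw [hp]
        intro r hr
        rcases Nat.lt_or_ge r (j - k) with hr' | hr'
        · exact hPW r hr'
        · have hreq : r = j - k := by omega
          subst hreq
          rw [show k + (j - k) = j by omega, ← he',
            show (j - k) % (j - i) = (i - k) % (j - i) by
              rw [show j - k = (i - k) + (j - i) by omega, Nat.add_mod_right],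
            ← hPW (i - k) (by omega), show k + (i - k) = i by omega]
      · rw [if_neg he]
        have hlt : pvGd t i < pvGd t j := lt_of_le_of_ne hc.2 he
        have hp : j + 1 - k = (j - k) + 1 := by omega
        -- the new scanned prefix (one character longer) is itself Lyndon
        have hnew : (t.drop k).take (j + 1 - k) = (t.drop k).take (j - k) ++ [pvGd t j] := by
          rw [hp, List.take_succ]
          congr 1
          rw [List.getElem?_drop, List.getElem?_eq_getElem (by omega)]
          simp [pv_gd_eq_getElem t j hc.1, show k + (j - k) = j by omega]
        have hLyn' : pvLyn ((t.drop k).take (j + 1 - k)) := by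
          rw [hnew]
          apply pv_lyn_extend ((t.drop k).take (j - i)) _ _ (j - i) (j - k)
          · simp [List.length_take, List.length_drop]; omega
          · omega
          · omega
          · simp [List.length_take, List.length_drop]; omega
          · exact hLyn
          · intro r hr
            rw [pv_gd_take _ _ _ hr, pv_gd_drop]
            exact hPW r hr
          · rw [show (j - k) % (j - i) = (i - k) % (j - i) by
                rw [show j - k = (i - k) + (j - i) by omega, Nat.add_mod_right],
              ← hPW (i - k) (by omega), show k + (i - k) = i by omega]
            exact hlt
        apply ih k (j + 1) (by omega) le_rfl (by omega) (by omega)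
          (by rw [show j + 1 - k = j + 1 - k by rfl]; exact hLyn')
        intro r hr
        have hrr : r % (j + 1 - k) = r := Nat.mod_eq_of_lt hr
        rw [hrr, pv_gd_take _ _ _ hr, pv_gd_drop]
    · refine ⟨i, j, ?_, h1, h2, h3, hLyn, hPW, ?_⟩
      · rw [pvInnerA, dif_neg hc]
      · rcases Nat.lt_or_ge j t.length with hj | hj
        · exact Or.inr ⟨hj, by
            have := not_and.mp hc hj
            exact lt_of_not_ge fun hge => this hge⟩
        · exact Or.inl (by omega)

lemma pv_lyn_short (u : List Char) (h : u.length ≤ 1) : pvLyn u := by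
  intro i h1 h2; omega

lemma pv_plen_pos (r : List Char) : 1 ≤ pvPLen r := by
  unfold pvPLen
  have : ∀ (l : List Nat) acc, 1 ≤ acc → (∀ L ∈ l, 1 ≤ L) →
      1 ≤ l.foldl (fun p L => if pvIsLyn (r.take L) then L else p) acc := by
    intro l
    induction l with
    | nil => intro acc h _; exact h
    | cons a l ih =>
      intro acc h hl
      simp only [List.foldl_cons]
      split
      · exact ih _ (hl a List.mem_cons_self) fun L hL => hl L (List.mem_cons_of_mem a hL)
      · exact ih _ h fun L hL => hl L (List.mem_cons_of_mem a hL)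
  apply this _ _ le_rfl
  intro L hL
  simp only [List.mem_range'_1] at hL
  omega

lemma pv_loopB_fuel (t : List Char) (n N : Nat) :
    ∀ f1 f2 pos prev rep, N - pos < f1 → N - pos < f2 →
      pvLoopB t n N f1 pos prev rep = pvLoopB t n N f2 pos prev rep := by
  intro f1
  induction f1 with
  | zero => omega
  | succ g ih =>
    intro f2 pos prev rep h1 h2
    obtain ⟨h, rfl⟩ : ∃ h, f2 = h + 1 := ⟨f2 - 1, by omega⟩
    by_cases hp : pos < N
    · simp only [pvLoopB, if_pos hp]
      have hpl := pv_plen_pos (t.drop pos)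
      split <;> (split; · rfl
                 · exact ih _ _ _ _ (by omega) (by omega))
    · simp only [pvLoopB, if_neg hp]

-- the segment at any period-multiple offset inside the scanned region equals u
lemma pv_seg (t : List Char) (k0 p j ℓ : Nat) (hp0 : 0 < p) (hj : j ≤ t.length)
    (hPW : ∀ r, r < j - k0 → pvGd t (k0 + r) = pvGd ((t.drop k0).take p) (r % p))
    (hpos : k0 + ℓ * p + p ≤ j) :
    (t.drop (k0 + ℓ * p)).take p = (t.drop k0).take p := by
  apply pv_ext_gd
  · simp [List.length_take, List.length_drop]; omega
  · intro r hr
    simp only [List.length_take, List.length_drop] at hr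
    have hrp : r < p := by omega
    rw [pv_gd_take _ _ _ hrp, pv_gd_drop, show k0 + ℓ * p + r = k0 + (ℓ * p + r) by omega,
      hPW (ℓ * p + r) (by omega), Nat.mul_comm ℓ p, Nat.mul_add_mod, Nat.mod_eq_of_lt hrp]

lemma pv_emitA_step (t : List Char) (n i j fuel k old : Nat) (prev : List Char) (rep : Nat)
    (w : List Char) (h : k < i + 1) :
    pvEmitA t n i j (fuel + 1) k old prev rep w =
      (if ((t.drop old).take (k + (j - i) - old)).length *
            (if (t.drop old).take (k + (j - i) - old) = w then rep + 1 else 1) = n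
       then Sum.inr (List.flatten (List.replicate
              (if (t.drop old).take (k + (j - i) - old) = w then rep + 1 else 1)
              ((t.drop old).take (k + (j - i) - old))))
       else pvEmitA t n i j fuel (k + (j - i)) (k + (j - i))
              (if (t.drop old).take (k + (j - i) - old) = w then w
               else (t.drop old).take (k + (j - i) - old))
              (if (t.drop old).take (k + (j - i) - old) = w then rep + 1 else 1)
              ((t.drop old).take (k + (j - i) - old))) := by
  simp only [pvEmitA, if_pos h]

lemma pv_emitA_exit (t : List Char) (n i j fuel k old : Nat) (prev : List Char) (rep : Nat)
    (w : List Char) (h : ¬ k < i + 1) :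
    pvEmitA t n i j (fuel + 1) k old prev rep w = Sum.inl (k, old, prev, rep, w) := by
  simp only [pvEmitA, if_neg h]

lemma pv_loopB_step (t : List Char) (n N fuel pos : Nat) (prev : Option (List Char)) (rep : Nat)
    (h : pos < N) :
    pvLoopB t n N (fuel + 1) pos prev rep =
      (if pvPLen (t.drop pos) *
            (if some ((t.drop pos).take (pvPLen (t.drop pos))) = prev then rep + 1 else 1) = n
       then List.flatten (List.replicate
              (if some ((t.drop pos).take (pvPLen (t.drop pos))) = prev then rep + 1 else 1)
              ((t.drop pos).take (pvPLen (t.drop pos))))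
       else pvLoopB t n N fuel (pos + pvPLen (t.drop pos))
              (some ((t.drop pos).take (pvPLen (t.drop pos))))
              (if some ((t.drop pos).take (pvPLen (t.drop pos))) = prev then rep + 1 else 1)) := by
  simp only [pvLoopB, if_pos h]

lemma pv_emit_chain (t : List Char) (n k0 i j : Nat)
    (hk : k0 ≤ i) (hij : i < j) (hjN : j ≤ t.length)
    (hLyn : pvLyn ((t.drop k0).take (j - i)))
    (hPW : ∀ r, r < j - k0 → pvGd t (k0 + r) = pvGd ((t.drop k0).take (j - i)) (r % (j - i)))
    (hEND : j = t.length ∨ (j < t.length ∧ pvGd t j < pvGd t i)) :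
    ∀ fe ℓ (prevA : List Char) (rep : Nat) (w : List Char) (prevB : Option (List Char)) (fb : Nat),
      ℓ < (j - k0) / (j - i) →
      (prevB = some w ∨ (prevB = none ∧ w = [])) →
      (j - k0) / (j - i) - ℓ < fe → t.length - (k0 + ℓ * (j - i)) < fb →
      (∃ r, pvEmitA t n i j fe (k0 + ℓ * (j - i)) (k0 + ℓ * (j - i)) prevA rep w = Sum.inr r ∧
            pvLoopB t n t.length fb (k0 + ℓ * (j - i)) prevB rep = r) ∨
      (∃ repF,
        pvEmitA t n i j fe (k0 + ℓ * (j - i)) (k0 + ℓ * (j - i)) prevA rep w =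
          Sum.inl (k0 + (j - k0) / (j - i) * (j - i), k0 + (j - k0) / (j - i) * (j - i),
            (t.drop k0).take (j - i), repF, (t.drop k0).take (j - i)) ∧
        ∀ fb', t.length - (k0 + (j - k0) / (j - i) * (j - i)) < fb' →
          pvLoopB t n t.length fb (k0 + ℓ * (j - i)) prevB rep =
            pvLoopB t n t.length fb' (k0 + (j - k0) / (j - i) * (j - i))
              (some ((t.drop k0).take (j - i))) repF) := by
  intro fe
  induction fe with
  | zero => intro ℓ prevA rep w prevB fb hℓ hrel hfe hfb; omega
  | succ g ih =>
    intro ℓ prevA rep w prevB fb hℓ hrel hfe hfb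
    have hp0 : 0 < j - i := by omega
    set p := j - i with hpdef
    obtain ⟨e, hedef⟩ : ∃ e', e' = (j - k0) / p := ⟨_, rfl⟩
    rw [← hedef] at hℓ hfe ih ⊢
    set u := (t.drop k0).take p with hudef
    have hdm : p * e + (j - k0) % p = j - k0 := by
      rw [hedef]; exact Nat.div_add_mod (j - k0) p
    have hmp : (j - k0) % p < p := Nat.mod_lt _ hp0
    have hmc : p * e = e * p := Nat.mul_comm p e
    have hep : e * p ≤ j - k0 := by omega
    have hlp : (ℓ + 1) * p = ℓ * p + p := by ring
    have hl1 : (ℓ + 1) * p ≤ e * p := Nat.mul_le_mul_right p (by omega)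
    set pos := k0 + ℓ * p with hposdef
    have hie : i + p = j := by omega
    have hposj : pos + p ≤ j := by omega
    have hposN : pos < t.length := by omega
    have hseg : (t.drop pos).take p = u := pv_seg t k0 p j ℓ hp0 hjN hPW hposj
    have hulen : u.length = p := by
      rw [hudef]; simp [List.length_take, List.length_drop]; omega
    have hune : u ≠ [] := by
      intro hnil
      rw [hnil] at hulen
      simp at hulen
      omega
    have hplen : pvPLen (t.drop pos) = p := by
      apply pv_plen_eq t pos p (j - pos) hp0 (by omega) (by omega)
      · rw [hseg]; exact hLyn
      · intro r hr
        rw [hseg, hposdef, show k0 + ℓ * p + r = k0 + (ℓ * p + r) by omega,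
          hPW (ℓ * p + r) (by omega), Nat.mul_comm ℓ p, Nat.mul_add_mod]
      · rcases hEND with h | ⟨h1, h2⟩
        · left; omega
        · right
          refine ⟨by omega, ?_⟩
          rw [hseg, show pos + (j - pos) = j by omega]
          have hi : pvGd t i = pvGd u ((j - pos) % p) := by
            rw [show i = k0 + (i - k0) by omega, hPW (i - k0) (by omega)]
            congr 1
            have e1 : i - k0 + p = j - k0 := by omega
            have e2 : (j - pos) + ℓ * p = j - k0 := by omega
            calc (i - k0) % p = (i - k0 + p) % p := (Nat.add_mod_right _ p).symm
              _ = (j - k0) % p := by rw [e1]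
              _ = ((j - pos) + ℓ * p) % p := by rw [e2]
              _ = (j - pos) % p := Nat.add_mul_mod_self_right _ _ _
          rw [← hi]
          exact h2
    -- one step of A
    have hkp : pos + (j - i) - pos = p := by omega
    have hw' : (t.drop pos).take (pos + (j - i) - pos) = u := by rw [hkp, hseg]
    set rep' := if u = w then rep + 1 else 1 with hrepdef
    have hA : pvEmitA t n i j (g + 1) pos pos prevA rep w =
        if p * rep' = n then Sum.inr (List.flatten (List.replicate rep' u))
        else pvEmitA t n i j g (pos + p) (pos + p) u rep' u := by
      rw [pv_emitA_step t n i j g pos pos prevA rep w (by omega), hw', hulen]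
      have hprevU : (if u = w then w else u) = u := by
        split
        · rename_i h; exact h.symm
        · rfl
      rw [hprevU, show pos + (j - i) = pos + p from rfl]
    -- one step of B
    obtain ⟨fbm, rfl⟩ : ∃ fbm, fb = fbm + 1 := ⟨fb - 1, by omega⟩
    have hcondeq : (if some ((t.drop pos).take (pvPLen (t.drop pos))) = prevB then rep + 1 else 1) = rep' := by
      rw [hplen, hseg, hrepdef]
      rcases hrel with h | ⟨h1, h2⟩
      · subst h; simp only [Option.some.injEq]
      · subst h1; subst h2; simp [hune]
    have hB : pvLoopB t n t.length (fbm + 1) pos prevB rep =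
        if p * rep' = n then List.flatten (List.replicate rep' u)
        else pvLoopB t n t.length fbm (pos + p) (some u) rep' := by
      rw [pv_loopB_step t n t.length fbm pos prevB rep hposN, hcondeq, hplen, hseg]
    by_cases hret : p * rep' = n
    · left
      exact ⟨List.flatten (List.replicate rep' u), by rw [hA, if_pos hret], by rw [hB, if_pos hret]⟩
    · have hA' : pvEmitA t n i j (g + 1) pos pos prevA rep w =
          pvEmitA t n i j g (pos + p) (pos + p) u rep' u := by rw [hA, if_neg hret]
      have hB' : pvLoopB t n t.length (fbm + 1) pos prevB rep =
          pvLoopB t n t.length fbm (pos + p) (some u) rep' := by rw [hB, if_neg hret]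
      by_cases hnext : ℓ + 1 < e
      · have hpos' : k0 + (ℓ + 1) * p = pos + p := by omega
        have := ih (ℓ + 1) u rep' u (some u) fbm hnext (Or.inl rfl) (by omega) (by omega)
        rw [hpos'] at this
        rcases this with ⟨r, h1, h2⟩ | ⟨repF, h1, h2⟩
        · exact Or.inl ⟨r, by rw [hA']; exact h1, by rw [hB']; exact h2⟩
        · refine Or.inr ⟨repF, by rw [hA']; exact h1, ?_⟩
          intro fb' hfb'
          rw [hB']
          exact h2 fb' hfb'
      · have hlast : ℓ + 1 = e := by omega
        have hpos' : pos + p = k0 + e * p := by rw [← hlast, hlp]; omega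
        obtain ⟨g', rfl⟩ : ∃ g', g = g' + 1 := ⟨g - 1, by omega⟩
        have hexit : ¬ (pos + p < i + 1) := by omega
        refine Or.inr ⟨rep', ?_, ?_⟩
        · rw [hA', pv_emitA_exit t n i j g' (pos + p) (pos + p) u rep' u hexit, hpos']
        · intro fb' hfb'
          rw [hB', hpos']
          exact pv_loopB_fuel t n t.length fbm fb' (k0 + e * p) (some u) rep' (by omega) (by omega)

theorem pv_main (t : List Char) (n : Nat) :
    ∀ (fa fb k : Nat) (prevA w : List Char) (rep : Nat) (prevB : Option (List Char)),
      (prevB = some w ∨ (prevB = none ∧ w = [])) →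
      t.length - k + 1 ≤ fa → t.length - k + 1 ≤ fb →
      pvOuterA t n t.length fa k k prevA rep w = pvLoopB t n t.length fb k prevB rep := by
  intro fa
  induction fa with
  | zero => intro fb k prevA w rep prevB _ hfa _; omega
  | succ g ih =>
    intro fb k prevA w rep prevB hrel hfa hfb
    by_cases hk : k < t.length
    · have hone : k + 1 - k = 1 := by omega
      obtain ⟨i, j, heq, h1, h2, h3, hLyn, hPW, hEND⟩ :=
        pv_inner_spec t k (t.length - (k + 1)) k (k + 1) (by omega) le_rfl (by omega) (by omega)
          (by rw [hone]
              apply pv_lyn_short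
              simp [List.length_take])
          (by rw [hone]
              intro r hr
              have hr0 : r = 0 := by omega
              subst hr0
              rw [Nat.zero_mod, pv_gd_take _ _ _ (by omega), pv_gd_drop])
      have hp0 : 0 < j - i := by omega
      have he1 : 1 ≤ (j - k) / (j - i) := (Nat.one_le_div_iff hp0).mpr (by omega)
      have heS : (j - k) / (j - i) ≤ j - k := Nat.div_le_self _ _
      have hstep : pvOuterA t n t.length (g + 1) k k prevA rep w =
          (match pvEmitA t n i j (t.length + 1) k k prevA rep w with
           | .inr r => r
           | .inl st => pvOuterA t n t.length g st.1 st.2.1 st.2.2.1 st.2.2.2.1 st.2.2.2.2) := by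
        simp only [pvOuterA, if_pos hk, heq]
      have chain := pv_emit_chain t n k i j h1 h2 h3 hLyn hPW hEND (t.length + 1) 0 prevA rep w
        prevB fb (by omega) hrel (by omega) (by
          rw [show k + 0 * (j - i) = k by omega]
          omega)
      rw [show k + 0 * (j - i) = k by omega] at chain
      have hep1 : 1 ≤ (j - k) / (j - i) * (j - i) := Nat.mul_pos he1 hp0
      set k' := k + (j - k) / (j - i) * (j - i) with hk'def
      set u := (t.drop k).take (j - i) with hudef
      rcases chain with ⟨r, hA, hB⟩ | ⟨repF, hA, hB⟩
      · rw [hstep, hA, hB]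
      · rw [hstep, hA]
        show pvOuterA t n t.length g k' k' u repF u = pvLoopB t n t.length fb k prevB rep
        have hkk' : k + 1 ≤ k' := by omega
        have hih := ih (t.length - k' + 1) k' u u repF (some u) (Or.inl rfl) (by omega) le_rfl
        rw [hih, ← hB (t.length - k' + 1) (by omega)]
    · obtain ⟨fbm, rfl⟩ : ∃ fbm, fb = fbm + 1 := ⟨fb - 1, by omega⟩
      simp only [pvOuterA, pvLoopB, if_neg hk]

-- ===== VERDICT (by name: the statement is the Claim_ definition above) =====
theorem smallest_rotation_py_spec : Claim_equal_smallest_rotation_py := by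
  intro s _ _
  unfold Spec_smallest_rotation_py smallest_rotation_py smallest_rotation_py_alt
  have h := pv_main (s.toList ++ s.toList) s.toList.length
    (s.toList ++ s.toList).length.succ (s.toList ++ s.toList).length.succ 0 [] [] 0 none
    (Or.inr ⟨rfl, rfl⟩) (by omega) (by omega)
  exact congrArg String.mk h
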